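-- pv_equiv track=rewrite | github.com/Mariovr/AdventOfCode | 21.py | get_a_parts
-- ===== SOURCE A (Python) =====
-- from collections import Counter, defaultdict, deque #defaultdict provides default function when accessing key not present
--
-- def get_a_parts(target, cnt = 1):
--     #parts of the string that ends at A, and starts at A we can treat independently so for all copies we only have to do the calculations once.
--     #Checking the cache we see that sometimes for a full string after 12 iterations still it is completely covered by only a few A -> A character strings, so there is a huge amount of repetition.
--     Aind = [ i for i, c in enumerate(target) if c == 'A']
--     dif = list(zip([-1] + Aind , Aind + [len(target) ] ))
--     partcount = Counter()
--     for i , j in dif: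
--         text = target[i+1:j+1]
--         if text != '':
--             partcount[text] +=1 *cnt
--     return partcount
-- ===== SOURCE B (Python) =====
-- from collections import Counter
--
-- def get_a_parts(target, cnt = 1):
--     # Reconstruct the 'A'-terminated segments from split('A') instead of
--     # building an index list / zip / slicing.
--     parts = target.split('A')
--     partcount = Counter()
--     for part in parts[:-1]:
--         partcount[part + 'A'] += cnt
--     if parts[-1] != '':
--         partcount[parts[-1]] += cnt
--     return partcount
-- ===== Notes on version B (the rewrite author's own statement) =====
-- stated objective: simpler
-- what changed: B replaces A's enumerate-index-list/zip/slice machinery with a single split('A') pass: each non-final piece plus 'A' is an A-terminated segment, and the final piece is counted only when nonempty.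
import Mathlib
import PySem

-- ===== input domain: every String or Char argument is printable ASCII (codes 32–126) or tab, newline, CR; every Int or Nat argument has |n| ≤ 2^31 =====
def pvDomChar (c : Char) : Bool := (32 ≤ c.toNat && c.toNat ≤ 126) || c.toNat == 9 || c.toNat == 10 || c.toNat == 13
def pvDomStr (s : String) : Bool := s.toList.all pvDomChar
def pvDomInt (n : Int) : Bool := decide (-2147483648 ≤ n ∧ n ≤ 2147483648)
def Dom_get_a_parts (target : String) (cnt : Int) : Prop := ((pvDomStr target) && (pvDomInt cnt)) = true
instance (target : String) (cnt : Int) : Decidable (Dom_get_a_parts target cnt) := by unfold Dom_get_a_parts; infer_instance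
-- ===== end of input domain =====

-- B replaces A's index-list/zip/slice machinery with a single split('A') pass (simpler decomposition, same cost).

-- ===== PORT A =====
def get_a_parts (target : String) (cnt : Int) : List (String × Int) :=
  let cs := target.toList
  let aind : List Int := ((PySem.List.enumerate cs 0).filter (fun p => p.2 == 'A')).map (fun p => p.1)
  let dif : List (Int × Int) := List.zip ((-1) :: aind) (aind ++ [PySem.List.len cs])
  let partcount : PySem.Dict String Int :=
    dif.foldl (fun d p =>
      let text := PySem.List.slice cs (some (p.1 + 1)) (some (p.2 + 1))
      if text ≠ [] then d.modify (String.ofList text) 0 (· + 1 * cnt) else d)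
      PySem.Dict.empty
  partcount.items

-- ===== PORT B =====
def get_a_parts_alt (target : String) (cnt : Int) : List (String × Int) :=
  let parts : List (List Char) := PySem.Chars.splitOn target.toList ['A']
  let d0 : PySem.Dict String Int :=
    (PySem.List.slice parts none (some (-1))).foldl
      (fun d part => d.modify (String.ofList (part ++ ['A'])) 0 (· + cnt)) PySem.Dict.empty
  let lastPart := PySem.List.pyGetD parts (-1) []
  let d1 := if lastPart ≠ [] then d0.modify (String.ofList lastPart) 0 (· + cnt) else d0
  d1.items

-- ===== PRECONDITION & SPEC =====
def Spec_get_a_parts (target : String) (cnt : Int) (out : List (String × Int)) : Prop := out = get_a_parts_alt target cnt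
instance (target : String) (cnt : Int) (out : List (String × Int)) : Decidable (Spec_get_a_parts target cnt out) := by unfold Spec_get_a_parts; infer_instance

-- ===== CLAIM (what is proved, stated in full; the proofs are below) =====
def Claim_equal_get_a_parts : Prop := ∀ (target : String) (cnt : Int), Dom_get_a_parts target cnt → Spec_get_a_parts target cnt (get_a_parts target cnt)

-- ===== LEMMAS AND PROOFS =====

-- Reference splitter: Python's s.split('A') as a plain structural recursion.
def splitA : List Char → List (List Char)
  | [] => [[]]
  | c :: rest => if c = 'A' then [] :: splitA rest else (splitA rest).modifyHead (c :: ·)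

theorem splitA_ne_nil (cs : List Char) : splitA cs ≠ [] := by
  cases cs with
  | nil => simp [splitA]
  | cons c rest =>
    simp only [splitA]
    split_ifs
    · simp
    · cases h : splitA rest with
      | nil => exact absurd h (splitA_ne_nil rest)
      | cons p ps => simp

theorem splitOn_go_eq (cs : List Char) : ∀ (fuel : Nat) (cur : List Char) (acc : List (List Char)),
    cs.length ≤ fuel →
    PySem.Chars.splitOn.go ['A'] fuel cs cur acc
      = acc.reverse ++ (splitA cs).modifyHead (cur.reverse ++ ·) := by
  induction cs with
  | nil =>
    intro fuel cur acc _
    cases fuel <;> simp [PySem.Chars.splitOn.go, splitA]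
  | cons c rest ih =>
    intro fuel cur acc hf
    cases fuel with
    | zero => simp at hf
    | succ f =>
      have hf' : rest.length ≤ f := by simpa using hf
      by_cases hc : c = 'A'
      · subst hc
        have hpre : List.isPrefixOf ['A'] ('A' :: rest) = true := by
          simp [List.isPrefixOf]
        rw [show PySem.Chars.splitOn.go ['A'] (f+1) ('A' :: rest) cur acc
              = PySem.Chars.splitOn.go ['A'] f (List.drop 1 ('A' :: rest)) [] (cur.reverse :: acc) by
            simp [PySem.Chars.splitOn.go, hpre]]
        rw [List.drop_succ_cons, List.drop_zero, ih f [] (cur.reverse :: acc) hf']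
        cases h : splitA rest with
        | nil => exact absurd h (splitA_ne_nil rest)
        | cons p ps => simp [splitA, h]
      · have hpre : List.isPrefixOf ['A'] (c :: rest) = false := by
          simp [List.isPrefixOf]
          exact fun h => absurd h.symm hc
        rw [show PySem.Chars.splitOn.go ['A'] (f+1) (c :: rest) cur acc
              = PySem.Chars.splitOn.go ['A'] f rest (c :: cur) acc by
            simp [PySem.Chars.splitOn.go, hpre]]
        rw [ih f (c :: cur) acc hf']
        cases h : splitA rest with
        | nil => exact absurd h (splitA_ne_nil rest)
        | cons p ps => simp [splitA, hc, h]

theorem splitOn_eq (cs : List Char) : PySem.Chars.splitOn cs ['A'] = splitA cs := by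
  rw [PySem.Chars.splitOn, splitOn_go_eq cs (cs.length + 1) [] [] (by omega)]
  cases h : splitA cs with
  | nil => exact absurd h (splitA_ne_nil cs)
  | cons p ps => simp

-- A's index list of 'A' positions and its slice list, named.
def idxA (cs : List Char) : List Int :=
  ((PySem.List.enumerate cs 0).filter (fun p => p.2 == 'A')).map (fun p => p.1)

def segsA (cs : List Char) : List (List Char) :=
  (List.zip ((-1) :: idxA cs) (idxA cs ++ [PySem.List.len cs])).map
    (fun p => PySem.List.slice cs (some (p.1 + 1)) (some (p.2 + 1)))

theorem enumerate_shift {α : Type} (xs : List α) (s : Int) :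
    PySem.List.enumerate xs (s + 1) = (PySem.List.enumerate xs s).map (fun p => (p.1 + 1, p.2)) := by
  induction xs generalizing s with
  | nil => simp [PySem.List.enumerate_nil]
  | cons x xs ih => simp [PySem.List.enumerate_cons, ih]

theorem idxA_cons (c : Char) (rest : List Char) :
    idxA (c :: rest) = (if c = 'A' then [(0:Int)] else []) ++ (idxA rest).map (· + 1) := by
  unfold idxA
  rw [PySem.List.enumerate_cons, show (0:Int) + 1 = 0 + 1 from rfl, enumerate_shift]
  by_cases hc : c = 'A' <;>
    simp [hc, List.filter_map, List.map_map, Function.comp_def]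

theorem idxA_cons_A (rest : List Char) :
    idxA ('A' :: rest) = 0 :: (idxA rest).map (· + 1) := by
  rw [idxA_cons]; simp

theorem idxA_cons_ne (c : Char) (rest : List Char) (hc : c ≠ 'A') :
    idxA (c :: rest) = (idxA rest).map (· + 1) := by
  rw [idxA_cons]; simp [hc]

theorem idxA_nonneg (cs : List Char) : ∀ i ∈ idxA cs, 0 ≤ i := by
  intro i hi
  simp only [idxA, List.mem_map, List.mem_filter] at hi
  obtain ⟨p, ⟨hp, _⟩, rfl⟩ := hi
  rw [PySem.List.mem_enumerate_iff] at hp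
  obtain ⟨k, _, rfl⟩ := hp
  simp

theorem slice_cons_succ (c : Char) (cs : List Char) (a b : Int) (ha : 0 ≤ a) (hb : 0 ≤ b) :
    PySem.List.slice (c :: cs) (some (a + 1)) (some (b + 1)) = PySem.List.slice cs (some a) (some b) := by
  rw [PySem.List.slice_toNat _ (by omega) (by omega), PySem.List.slice_toNat _ ha hb]
  have h1 : (a + 1).toNat = a.toNat + 1 := by omega
  have h2 : (b + 1).toNat = b.toNat + 1 := by omega
  simp [h1, h2]

theorem slice_cons_zero' (c : Char) (cs : List Char) (b : Int) (hb : 0 ≤ b) :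
    PySem.List.slice (c :: cs) (some 0) (some (b + 1)) = c :: PySem.List.slice cs (some 0) (some b) := by
  rw [PySem.List.slice_toNat _ le_rfl (by omega), PySem.List.slice_toNat _ le_rfl hb]
  have h2 : (b + 1).toNat = b.toNat + 1 := by omega
  simp [h2]

-- shifted pair list gives the same slices one level down
theorem zip_shift_slices (c : Char) (cs : List Char) (xs ys : List Int)
    (hx : ∀ i ∈ xs, -1 ≤ i) (hy : ∀ j ∈ ys, 0 ≤ j) :
    (List.zip (xs.map (· + 1)) (ys.map (· + 1))).map
        (fun p => PySem.List.slice (c :: cs) (some (p.1 + 1)) (some (p.2 + 1)))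
      = (List.zip xs ys).map (fun p => PySem.List.slice cs (some (p.1 + 1)) (some (p.2 + 1))) := by
  rw [List.zip_map, List.map_map]
  refine List.map_congr_left ?_
  intro p hp
  obtain ⟨h1, h2⟩ := List.of_mem_zip hp
  simp only [Function.comp_def, Prod.map]
  exact slice_cons_succ c cs (p.1 + 1) (p.2 + 1) (by have := hx _ h1; omega) (by have := hy _ h2; omega)

theorem len_cons (c : Char) (cs : List Char) :
    PySem.List.len (c :: cs) = PySem.List.len cs + 1 := by
  simp [PySem.List.len_eq]

theorem segsA_cons_A (rest : List Char) : segsA ('A' :: rest) = ['A'] :: segsA rest := by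
  unfold segsA
  rw [idxA_cons_A, len_cons]
  simp only [List.cons_append, List.zip_cons_cons, List.map_cons]
  refine congrArg₂ List.cons ?_ ?_
  · show PySem.List.slice ('A' :: rest) (some (-1 + 1)) (some (0 + 1)) = ['A']
    rw [show (-1 : Int) + 1 = 0 by ring, show (0 : Int) + 1 = 1 by ring,
      PySem.List.slice_toNat _ le_rfl (by norm_num)]
    rfl
  · rw [show ((0:Int) :: (idxA rest).map (· + 1)) = ((-1) :: idxA rest).map (· + 1) by simp,
      show ((idxA rest).map (· + 1) ++ [PySem.List.len rest + 1])
        = ((idxA rest) ++ [PySem.List.len rest]).map (· + 1) by simp]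
    exact zip_shift_slices 'A' rest _ _
      (fun i hi => by
        rcases List.mem_cons.mp hi with h | h
        · omega
        · have := idxA_nonneg rest i h; omega)
      (fun j hj => by
        rcases List.mem_append.mp hj with h | h
        · exact idxA_nonneg rest j h
        · simp at h; subst h; simp)

theorem segsA_cons_ne (c : Char) (rest : List Char) (hc : c ≠ 'A') :
    segsA (c :: rest) = (segsA rest).modifyHead (c :: ·) := by
  unfold segsA
  rw [idxA_cons_ne c rest hc, len_cons]
  cases hidx : idxA rest with
  | nil =>
    simp only [List.map_nil, List.nil_append, List.zip_cons_cons,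
      List.zip_nil_right, List.map_cons, List.modifyHead_cons]
    congr 1
    rw [show (-1 : Int) + 1 = 0 by ring]
    exact slice_cons_zero' c rest (PySem.List.len rest + 1)
      (by rw [PySem.List.len_eq]; positivity)
  | cons i0 idx' =>
    have h0 : 0 ≤ i0 := idxA_nonneg rest i0 (by rw [hidx]; simp)
    simp only [List.map_cons, List.cons_append, List.zip_cons_cons, List.modifyHead_cons]
    congr 1
    · show PySem.List.slice (c :: rest) (some (-1 + 1)) (some ((i0 + 1) + 1))
        = c :: PySem.List.slice rest (some (-1 + 1)) (some (i0 + 1))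
      rw [show (-1 : Int) + 1 = 0 by ring]
      exact slice_cons_zero' c rest (i0 + 1) (by omega)
    · rw [show ((i0 + 1) :: idx'.map (· + 1)) = ((i0 :: idx').map (· + 1)) by simp,
        show (idx'.map (· + 1) ++ [PySem.List.len rest + 1])
          = ((idx' ++ [PySem.List.len rest]).map (· + 1)) by simp]
      exact zip_shift_slices c rest (i0 :: idx') (idx' ++ [PySem.List.len rest])
        (fun i hi => by
          rcases List.mem_cons.mp hi with h | h
          · omega
          · have := idxA_nonneg rest i (by rw [hidx]; exact List.mem_cons_of_mem _ h); omega)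
        (fun j hj => by
          rcases List.mem_append.mp hj with h | h
          · have := idxA_nonneg rest j (by rw [hidx]; exact List.mem_cons_of_mem _ h); omega
          · simp at h; subst h; simp)

-- segments rebuilt from the split pieces
def segsOfSplit : List (List Char) → List (List Char)
  | [] => []
  | [p] => [p]
  | p :: q :: ps => (p ++ ['A']) :: segsOfSplit (q :: ps)

theorem segsA_eq_segsOfSplit (cs : List Char) : segsA cs = segsOfSplit (splitA cs) := by
  induction cs with
  | nil =>
    have h : segsA [] = [[]] := by decide
    rw [h]; rfl
  | cons c rest ih =>
    by_cases hc : c = 'A'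
    · subst hc
      rw [segsA_cons_A, ih]
      cases h : splitA rest with
      | nil => exact absurd h (splitA_ne_nil rest)
      | cons p ps => simp [splitA, h, segsOfSplit]
    · rw [segsA_cons_ne c rest hc, ih]
      cases h : splitA rest with
      | nil => exact absurd h (splitA_ne_nil rest)
      | cons p ps =>
        simp only [splitA, if_neg hc, h, List.modifyHead_cons]
        cases ps with
        | nil => rfl
        | cons q qs => simp [segsOfSplit]

theorem segsOfSplit_eq (l : List (List Char)) (h : l ≠ []) :
    segsOfSplit l = l.dropLast.map (· ++ ['A']) ++ [l.getLast h] := by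
  induction l with
  | nil => exact absurd rfl h
  | cons p ps ih =>
    cases ps with
    | nil => rfl
    | cons q qs =>
      rw [show segsOfSplit (p :: q :: qs) = (p ++ ['A']) :: segsOfSplit (q :: qs) from rfl,
        ih (by simp)]
      simp [List.getLast]

-- fold with a nonempty guard = fold over the filtered mapped list
theorem foldl_guard {β δ : Type} (F : δ → List Char → δ) (sl : β → List Char)
    (l : List β) (b : δ) :
    List.foldl (fun d p => if sl p ≠ [] then F d (sl p) else d) b l
      = List.foldl F b ((l.map sl).filter (fun t => decide (t ≠ []))) := by
  induction l generalizing b with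
  | nil => rfl
  | cons x xs ih =>
    simp only [List.foldl_cons, List.map_cons, List.filter_cons]
    by_cases hx : sl x = []
    · rw [if_neg (by simp [hx]), if_neg (by simp [hx]), ih]
    · rw [if_pos (by simp [hx]), if_pos (by simp [hx]), List.foldl_cons, ih]

-- the filtered A-segments are exactly B's segment list
theorem filter_segsOfSplit (l : List (List Char)) (h : l ≠ []) :
    (segsOfSplit l).filter (fun t => decide (t ≠ []))
      = l.dropLast.map (· ++ ['A']) ++ (if l.getLast h ≠ [] then [l.getLast h] else []) := by
  rw [segsOfSplit_eq l h, List.filter_append]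
  congr 1
  · rw [List.filter_eq_self]
    intro t ht
    obtain ⟨s, _, rfl⟩ := List.mem_map.mp ht
    simp
  · by_cases hl : l.getLast h = [] <;> simp [hl]

def q : List Char → Bool := fun t => decide (t ≠ [])
def h (cnt : Int) : PySem.Dict String Int → List Char → PySem.Dict String Int :=
  fun d t => d.modify (String.ofList t) 0 (· + cnt)
def F0 (cs : List Char) (cnt : Int) : PySem.Dict String Int → Int × Int → PySem.Dict String Int :=
  fun d p =>
    if PySem.List.slice cs (some (p.1 + 1)) (some (p.2 + 1)) ≠ [] then
      d.modify (String.ofList (PySem.List.slice cs (some (p.1 + 1)) (some (p.2 + 1)))) 0 (· + 1 * cnt)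
    else d
def zipL (cs : List Char) : List (Int × Int) := List.zip ((-1) :: idxA cs) (idxA cs ++ [PySem.List.len cs])
def B1 (cnt : Int) (parts : List (List Char)) : PySem.Dict String Int :=
  List.foldl (fun d part => d.modify (String.ofList (part ++ ['A'])) 0 (· + cnt)) PySem.Dict.empty parts

theorem S1 (cs : List Char) (cnt : Int) :
    List.foldl (F0 cs cnt) PySem.Dict.empty (zipL cs)
      = List.foldl (h cnt) PySem.Dict.empty ((segsA cs).filter q) := by
  unfold F0 zipL h q
  simp only [one_mul]
  exact foldl_guard (fun (d : PySem.Dict String Int) t => d.modify (String.ofList t) 0 (· + cnt))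
    (fun (p : Int × Int) => PySem.List.slice cs (some (p.1 + 1)) (some (p.2 + 1)))
    (List.zip ((-1) :: idxA cs) (idxA cs ++ [PySem.List.len cs])) PySem.Dict.empty

theorem S3 (cs : List Char) (cnt : Int) :
    List.foldl (h cnt) PySem.Dict.empty ((segsA cs).filter q)
      = List.foldl (h cnt) PySem.Dict.empty ((segsOfSplit (PySem.Chars.splitOn cs ['A'])).filter q) := by
  rw [segsA_eq_segsOfSplit, splitOn_eq]

theorem S4 (cs : List Char) (cnt : Int) (hne : PySem.Chars.splitOn cs ['A'] ≠ []) :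
    List.foldl (h cnt) PySem.Dict.empty ((segsOfSplit (PySem.Chars.splitOn cs ['A'])).filter q)
      = List.foldl (h cnt) PySem.Dict.empty
          ((PySem.Chars.splitOn cs ['A']).dropLast.map (· ++ ['A'])
            ++ (if (PySem.Chars.splitOn cs ['A']).getLast hne ≠ [] then
                  [(PySem.Chars.splitOn cs ['A']).getLast hne] else [])) := by
  unfold q
  rw [filter_segsOfSplit _ hne]

theorem S5 (cs : List Char) (cnt : Int) (hne : PySem.Chars.splitOn cs ['A'] ≠ []) :
    List.foldl (h cnt) PySem.Dict.empty
        ((PySem.Chars.splitOn cs ['A']).dropLast.map (· ++ ['A'])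
          ++ (if (PySem.Chars.splitOn cs ['A']).getLast hne ≠ [] then
                [(PySem.Chars.splitOn cs ['A']).getLast hne] else []))
      = List.foldl (h cnt) (B1 cnt (PySem.Chars.splitOn cs ['A']).dropLast)
          (if (PySem.Chars.splitOn cs ['A']).getLast hne ≠ [] then
            [(PySem.Chars.splitOn cs ['A']).getLast hne] else []) := by
  unfold B1 h
  rw [List.foldl_append, List.foldl_map]

theorem S7 (cs : List Char) (cnt : Int) (hne : PySem.Chars.splitOn cs ['A'] ≠ []) :
    List.foldl (h cnt) (B1 cnt (PySem.Chars.splitOn cs ['A']).dropLast)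
        (if (PySem.Chars.splitOn cs ['A']).getLast hne ≠ [] then
          [(PySem.Chars.splitOn cs ['A']).getLast hne] else [])
      = (if (PySem.Chars.splitOn cs ['A']).getLast hne ≠ [] then
          (B1 cnt (PySem.Chars.splitOn cs ['A']).dropLast).modify
            (String.ofList ((PySem.Chars.splitOn cs ['A']).getLast hne)) 0 (· + cnt)
        else B1 cnt (PySem.Chars.splitOn cs ['A']).dropLast) := by
  by_cases hl : (PySem.Chars.splitOn cs ['A']).getLast hne = [] <;> simp [hl, h]

set_option maxHeartbeats 1000000 in
theorem S0 (cs : List Char) (cnt : Int) (hne : PySem.Chars.splitOn cs ['A'] ≠ []) :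
    (if PySem.List.pyGetD (PySem.Chars.splitOn cs ['A']) (-1) [] ≠ [] then
        (B1 cnt (PySem.List.slice (PySem.Chars.splitOn cs ['A']) none (some (-1)))).modify
          (String.ofList (PySem.List.pyGetD (PySem.Chars.splitOn cs ['A']) (-1) [])) 0 (· + cnt)
      else B1 cnt (PySem.List.slice (PySem.Chars.splitOn cs ['A']) none (some (-1))))
      = (if (PySem.Chars.splitOn cs ['A']).getLast hne ≠ [] then
          (B1 cnt (PySem.Chars.splitOn cs ['A']).dropLast).modify
            (String.ofList ((PySem.Chars.splitOn cs ['A']).getLast hne)) 0 (· + cnt)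
        else B1 cnt (PySem.Chars.splitOn cs ['A']).dropLast) := by
  rw [PySem.List.slice_to_neg_one, PySem.List.pyGetD_neg_one _ _ hne]

-- the two dictionaries are equal
theorem dict_eq (cs : List Char) (cnt : Int) :
    List.foldl (fun (d : PySem.Dict String Int) (p : Int × Int) =>
        if PySem.List.slice cs (some (p.1 + 1)) (some (p.2 + 1)) ≠ [] then
          d.modify (String.ofList (PySem.List.slice cs (some (p.1 + 1)) (some (p.2 + 1)))) 0 (· + 1 * cnt)
        else d)
      PySem.Dict.empty
      (List.zip ((-1) :: idxA cs) (idxA cs ++ [PySem.List.len cs]))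
    = (if PySem.List.pyGetD (PySem.Chars.splitOn cs ['A']) (-1) [] ≠ [] then
        (List.foldl (fun (d : PySem.Dict String Int) part => d.modify (String.ofList (part ++ ['A'])) 0 (· + cnt))
            PySem.Dict.empty (PySem.List.slice (PySem.Chars.splitOn cs ['A']) none (some (-1)))).modify
          (String.ofList (PySem.List.pyGetD (PySem.Chars.splitOn cs ['A']) (-1) [])) 0 (· + cnt)
      else
        List.foldl (fun (d : PySem.Dict String Int) part => d.modify (String.ofList (part ++ ['A'])) 0 (· + cnt))
          PySem.Dict.empty (PySem.List.slice (PySem.Chars.splitOn cs ['A']) none (some (-1)))) := by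
  have hne : PySem.Chars.splitOn cs ['A'] ≠ [] := by
    rw [splitOn_eq]; exact splitA_ne_nil cs
  exact (S1 cs cnt).trans ((S3 cs cnt).trans ((S4 cs cnt hne).trans
    ((S5 cs cnt hne).trans ((S7 cs cnt hne).trans (S0 cs cnt hne).symm))))

-- ===== VERDICT (by name: the statement is the Claim_ definition above) =====
theorem get_a_parts_spec : Claim_equal_get_a_parts := by
  intro target cnt _
  show get_a_parts target cnt = get_a_parts_alt target cnt
  exact congrArg PySem.Dict.items (dict_eq target.toList cnt)
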